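-- pv_equiv track=rewrite | github.com/MrBrantCode/unitest_baseline | mut_generate/mist_train_cf/cf_94744/solution.py | sort_dictionaries
-- ===== SOURCE A (Python) =====
-- def sort_dictionaries(lst):
--     # Create a copy of the original list to ensure it remains unchanged
--     sorted_lst = lst.copy()
--
--     # Implement bubble sort algorithm
--     for i in range(len(sorted_lst)):
--         for j in range(len(sorted_lst) - 1 - i):
--             # Compare values of the keys in descending order
--             if list(sorted_lst[j].values())[0] < list(sorted_lst[j + 1].values())[0]:
--                 sorted_lst[j], sorted_lst[j + 1] = sorted_lst[j + 1], sorted_lst[j]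
--             # If values of the keys are the same, compare lengths of keys in ascending order
--             elif list(sorted_lst[j].values())[0] == list(sorted_lst[j + 1].values())[0]:
--                 if len(list(sorted_lst[j].keys())[0]) > len(list(sorted_lst[j + 1].keys())[0]):
--                     sorted_lst[j], sorted_lst[j + 1] = sorted_lst[j + 1], sorted_lst[j]
--                 # If lengths of keys are the same, compare keys alphabetically in descending order
--                 elif len(list(sorted_lst[j].keys())[0]) == len(list(sorted_lst[j + 1].keys())[0]):
--                     if list(sorted_lst[j].keys())[0] < list(sorted_lst[j + 1].keys())[0]:
--                         sorted_lst[j], sorted_lst[j + 1] = sorted_lst[j + 1], sorted_lst[j]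
--
--     return sorted_lst
-- ===== SOURCE B (Python) =====
-- def sort_dictionaries(lst):
--     # Three stable passes, least-significant key first:
--     # key descending, then key length ascending, then value descending.
--     out = sorted(lst, key=lambda d: list(d.keys())[0], reverse=True)
--     out = sorted(out, key=lambda d: len(list(d.keys())[0]))
--     return sorted(out, key=lambda d: list(d.values())[0], reverse=True)
-- ===== Notes on version B (the rewrite author's own statement) =====
-- stated objective: idiomatic
-- what changed: Replaces the hand-written quadratic bubble sort with three successive stable library sorted() passes from least to most significant key (key descending, key length ascending, value descending).
-- outside the precondition, e.g. on sort_dictionaries([{}]): A returns [{}], B raises IndexError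
import Mathlib
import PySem

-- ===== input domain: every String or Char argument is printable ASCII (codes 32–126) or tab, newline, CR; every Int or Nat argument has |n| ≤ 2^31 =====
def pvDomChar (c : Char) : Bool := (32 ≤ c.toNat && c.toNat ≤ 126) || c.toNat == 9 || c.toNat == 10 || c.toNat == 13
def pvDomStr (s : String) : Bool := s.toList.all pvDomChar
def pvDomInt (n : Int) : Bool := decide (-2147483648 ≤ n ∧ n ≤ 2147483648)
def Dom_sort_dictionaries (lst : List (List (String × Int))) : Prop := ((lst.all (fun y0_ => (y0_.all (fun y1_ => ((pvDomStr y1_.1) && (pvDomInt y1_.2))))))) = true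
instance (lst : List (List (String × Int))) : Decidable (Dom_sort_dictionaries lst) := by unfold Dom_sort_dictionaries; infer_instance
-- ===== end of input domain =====

-- B replaces A's hand-written bubble sort by three stable library sort passes
-- (least-significant key first); equivalence of the RETURN value is proved below
-- (neither program mutates its argument).

-- ===== PORT A =====

-- list(d.values())[0] / list(d.keys())[0]; the .getD default is only reached for an
-- empty dict, where Python raises IndexError — excluded by Pre_sort_dictionaries.
def pvVal0 (d : List (String × Int)) : Int :=
  (PySem.List.pyGet? (PySem.Dict.values ⟨d⟩) 0).getD 0
def pvKey0 (d : List (String × Int)) : String :=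
  (PySem.List.pyGet? (PySem.Dict.keys ⟨d⟩) 0).getD ""

def sort_dictionaries (lst : List (List (String × Int))) : List (List (String × Int)) :=
  let sorted_lst := lst
  let n := sorted_lst.length
  (List.range n).foldl (fun sl i =>
    (List.range (n - 1 - i)).foldl (fun sl j =>
      let dj  := (PySem.List.pyGet? sl (Int.ofNat j)).getD []
      let dj1 := (PySem.List.pyGet? sl (Int.ofNat j + 1)).getD []
      if pvVal0 dj < pvVal0 dj1 then
        (sl.set j dj1).set (j + 1) dj
      else if pvVal0 dj = pvVal0 dj1 then
        if PySem.Str.len (pvKey0 dj) > PySem.Str.len (pvKey0 dj1) then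
          (sl.set j dj1).set (j + 1) dj
        else if PySem.Str.len (pvKey0 dj) = PySem.Str.len (pvKey0 dj1) then
          if pvKey0 dj < pvKey0 dj1 then
            (sl.set j dj1).set (j + 1) dj
          else sl
        else sl
      else sl) sl) sorted_lst

-- ===== PORT B =====

def sort_dictionaries_alt (lst : List (List (String × Int))) : List (List (String × Int)) :=
  let out1 := PySem.List.sorted lst (fun d => pvKey0 d) true
  let out2 := PySem.List.sorted out1 (fun d => PySem.Str.len (pvKey0 d)) false
  PySem.List.sorted out2 (fun d => pvVal0 d) true

-- ===== PRECONDITION & SPEC =====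

-- Pre_ excludes lists containing an empty dict: there Python A raises IndexError as soon
-- as the list has two elements, and B's key lambdas raise IndexError on any such list.
def Pre_sort_dictionaries (lst : List (List (String × Int))) : Prop :=
  ∀ d ∈ lst, d ≠ []
instance (lst : List (List (String × Int))) : Decidable (Pre_sort_dictionaries lst) := by
  unfold Pre_sort_dictionaries; infer_instance

def pvWitness_sort_dictionaries : (List (List (String × Int))) :=
  [[("a", 1)], [("bb", 2)], [("c", 1)]]

def Spec_sort_dictionaries (lst : List (List (String × Int))) (out : List (List (String × Int))) : Prop := out = sort_dictionaries_alt lst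
instance (lst : List (List (String × Int))) (out : List (List (String × Int))) : Decidable (Spec_sort_dictionaries lst out) := by unfold Spec_sort_dictionaries; infer_instance

-- ===== CLAIM (what is proved, stated in full; the proofs are below) =====
def Claim_equal_sort_dictionaries : Prop := ∀ (lst : List (List (String × Int))), Dom_sort_dictionaries lst → Pre_sort_dictionaries lst → Spec_sort_dictionaries lst (sort_dictionaries lst)

-- ===== LEMMAS AND PROOFS =====

-- Abbreviation for the element type.
-- (plain def to keep everything top-level; a dict is an association list)

-- The boolean "x must come after y" test of A's bubble sort, as one predicate.
def aft (x y : List (String × Int)) : Bool :=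
  decide (pvVal0 x < pvVal0 y) ||
    (decide (pvVal0 x = pvVal0 y) &&
      (decide (PySem.Str.len (pvKey0 x) > PySem.Str.len (pvKey0 y)) ||
        (decide (PySem.Str.len (pvKey0 x) = PySem.Str.len (pvKey0 y)) &&
          decide (pvKey0 x < pvKey0 y))))

theorem aft_iff (x y : List (String × Int)) :
    aft x y = true ↔
      (pvVal0 x < pvVal0 y ∨ (pvVal0 x = pvVal0 y ∧
        (PySem.Str.len (pvKey0 y) < PySem.Str.len (pvKey0 x) ∨
          (PySem.Str.len (pvKey0 x) = PySem.Str.len (pvKey0 y) ∧ pvKey0 x < pvKey0 y)))) := by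
  simp [aft, gt_iff_lt]

theorem aft_A1 (a b : List (String × Int)) (h : aft a b = true) : aft b a = false := by
  rw [aft_iff] at h
  by_contra hc
  rw [Bool.not_eq_false, aft_iff] at hc
  rcases h with h | ⟨hv, h⟩ <;> rcases hc with hc | ⟨hv', hc⟩
  · omega
  · omega
  · omega
  · rcases h with h | ⟨hl, h⟩ <;> rcases hc with hc | ⟨hl', hc⟩
    · omega
    · omega
    · omega
    · exact absurd hc (asymm h)

theorem aft_T2 (x y z : List (String × Int)) (h1 : aft x y = true) (h2 : aft z y = false)
    : aft x z = true := by
  rw [aft_iff] at h1 ⊢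
  have h2' : ¬ (pvVal0 z < pvVal0 y ∨ (pvVal0 z = pvVal0 y ∧
      (PySem.Str.len (pvKey0 y) < PySem.Str.len (pvKey0 z) ∨
        (PySem.Str.len (pvKey0 z) = PySem.Str.len (pvKey0 y) ∧ pvKey0 z < pvKey0 y)))) := by
    rw [← aft_iff]; simp [h2]
  push_neg at h2'
  obtain ⟨hvz, h2'⟩ := h2'
  rcases h1 with h1 | ⟨hv, h1⟩
  · left; omega
  · by_cases hvv : pvVal0 z = pvVal0 y
    · obtain ⟨hlz, h2''⟩ := h2' hvv
      rcases h1 with h1 | ⟨hl, h1⟩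
      · exact Or.inr ⟨by omega, Or.inl (by omega)⟩
      · by_cases hll : PySem.Str.len (pvKey0 z) = PySem.Str.len (pvKey0 y)
        · exact Or.inr ⟨by omega, Or.inr ⟨by omega, lt_of_lt_of_le h1 (not_lt.mp (h2'' hll))⟩⟩
        · exact Or.inr ⟨by omega, Or.inl (by omega)⟩
    · left; omega

-- a full three-way tie never swaps
theorem aft_false_of_tie (x y : List (String × Int)) (hv : pvVal0 x = pvVal0 y)
    (hl : PySem.Str.len (pvKey0 x) = PySem.Str.len (pvKey0 y)) (hk : pvKey0 x = pvKey0 y) :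
    aft x y = false := by
  rw [← Bool.not_eq_true, aft_iff]
  intro hcon
  rcases hcon with h | ⟨_, h | ⟨_, h⟩⟩
  · omega
  · omega
  · rw [hk] at h; exact lt_irrefl _ h

-- ---------- generic bubble-sort development (over an arbitrary swap test bf) ----------

def gswap {α : Type} (bf : α → α → Bool) (l : List α) (j : Nat) : List α :=
  match l[j]?, l[j+1]? with
  | some x, some y => if bf x y then (l.set j y).set (j + 1) x else l
  | _, _ => l

def gpass {α : Type} (bf : α → α → Bool) : List α → Nat → List α
  | l, 0 => l
  | x :: y :: t, Nat.succ k => if bf x y then y :: gpass bf (x :: t) k else x :: gpass bf (y :: t) k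
  | l, Nat.succ _ => l

def gbub {α : Type} (bf : α → α → Bool) (n : Nat) (l : List α) : List α :=
  (List.range n).foldl (fun acc i => gpass bf acc (n - 1 - i)) l

def gbp {α : Type} (bf : α → α → Bool) (c : α) : List α → List α
  | [] => [c]
  | y :: t => if bf c y then y :: gbp bf c t else c :: gbp bf y t

-- "a strictly precedes b, or ties with it and the stability relation S orders them"
def gslt {α : Type} (bf : α → α → Bool) (S : α → α → Prop) (a b : α) : Prop :=
  bf b a = true ∨ (bf b a = false ∧ bf a b = false ∧ S a b)

theorem gswap_cons_succ {α : Type} (bf : α → α → Bool) (a : α) (l : List α) (j : Nat) :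
    gswap bf (a :: l) (j + 1) = a :: gswap bf l j := by
  unfold gswap
  cases hx : l[j]? <;> cases hy : l[j+1]? <;>
    simp [List.getElem?_cons_succ, hx, hy]
  split <;> simp

theorem gswap_gpass {α : Type} (bf : α → α → Bool) (k : Nat) :
    ∀ l : List α, gswap bf (gpass bf l k) k = gpass bf l (k + 1) := by
  induction k with
  | zero =>
    intro l
    match l with
    | [] => rfl
    | [x] => rfl
    | x :: y :: t =>
      simp only [gpass, gswap]
      by_cases h : bf x y <;> simp [h, List.set_cons_succ]
  | succ k ih =>
    intro l
    match l with
    | [] => rfl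
    | [x] => rfl
    | x :: y :: t =>
      simp only [gpass]
      by_cases h : bf x y <;> simp only [h, if_true, if_false, Bool.false_eq_true] <;>
        rw [gswap_cons_succ, ih]

theorem foldl_range_gswap {α : Type} (bf : α → α → Bool) (k : Nat) (l : List α) :
    (List.range k).foldl (gswap bf) l = gpass bf l k := by
  induction k with
  | zero => rfl
  | succ k ih => rw [List.range_succ, List.foldl_append, ih]; simpa using gswap_gpass bf k l

theorem length_gpass {α : Type} (bf : α → α → Bool) (l : List α) (k : Nat) :
    (gpass bf l k).length = l.length := by
  induction k generalizing l with
  | zero => rfl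
  | succ k ih =>
    match l with
    | [] => rfl
    | [x] => rfl
    | x :: y :: t => by_cases h : bf x y <;> simp [gpass, h, ih]

theorem gpass_append {α : Type} (bf : α → α → Bool) (k : Nat) :
    ∀ (ys zs : List α), k < ys.length → gpass bf (ys ++ zs) k = gpass bf ys k ++ zs := by
  induction k with
  | zero => intro ys zs _; rfl
  | succ k ih =>
    intro ys zs hlen
    match ys with
    | [] => simp at hlen
    | [x] => simp at hlen
    | x :: y :: t =>
      have ht : k < (x :: t).length := by simp at hlen ⊢; omega
      have ht' : k < (y :: t).length := by simpa using ht
      simp only [List.cons_append, gpass]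
      by_cases h : bf x y <;> simp only [h, if_true, if_false, Bool.false_eq_true]
      · rw [show x :: (t ++ zs) = (x :: t) ++ zs from rfl, ih _ _ ht]; rfl
      · rw [show y :: (t ++ zs) = (y :: t) ++ zs from rfl, ih _ _ ht']; rfl

theorem gpass_full {α : Type} (bf : α → α → Bool) (t : List α) :
    ∀ c, gpass bf (c :: t) t.length = gbp bf c t := by
  induction t with
  | nil => intro c; rfl
  | cons y t ih =>
    intro c
    show gpass bf (c :: y :: t) (t.length + 1) = _
    by_cases h : bf c y <;> simp [gpass, gbp, h, ih]

theorem gbp_spec {α : Type} (bf : α → α → Bool) (S : α → α → Prop)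
    (hA1 : ∀ a b, bf a b = true → bf b a = false)
    (hT2 : ∀ x y z, bf x y = true → bf z y = false → bf x z = true)
    (hHS : ∀ a b, bf a b = true → S b a)
    (t : List α) : ∀ c, (c :: t).Pairwise S →
      ∃ ys m, gbp bf c t = ys ++ [m] ∧ (c :: t).Perm (ys ++ [m]) ∧
        ys.Pairwise S ∧ (∀ a ∈ ys, gslt bf S a m) ∧ (∀ z ∈ c :: t, bf z m = false) := by
  have hT1 : ∀ a b c', bf a b = true → bf b c' = true → bf a c' = true :=
    fun a b c' h1 h2 => hT2 a b c' h1 (hA1 b c' h2)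
  have hirr : ∀ a, bf a a = false := by
    intro a
    cases hcc : bf a a with
    | false => rfl
    | true => exact absurd (hA1 a a hcc) (by simp [hcc])
  induction t with
  | nil =>
    intro c _
    refine ⟨[], c, rfl, List.Perm.refl _, List.Pairwise.nil, by simp, ?_⟩
    intro z hz
    rw [List.mem_singleton] at hz
    subst hz
    exact hirr z
  | cons y t' ih =>
    intro c hpw
    obtain ⟨hc, hyt⟩ := List.pairwise_cons.mp hpw
    obtain ⟨hy, ht⟩ := List.pairwise_cons.mp hyt
    by_cases hb : bf c y = true
    · -- carry c past y
      have hct' : (c :: t').Pairwise S :=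
        List.pairwise_cons.mpr ⟨fun z hz => hc z (List.mem_cons_of_mem _ hz), ht⟩
      obtain ⟨ys', m, heq, hperm, hpw', hslt, hmax⟩ := ih c hct'
      have hmem : ∀ a, a ∈ ys' → a ∈ c :: t' := by
        intro a ha
        exact hperm.symm.subset (List.mem_append_left _ ha)
      have hmmem : m ∈ c :: t' := hperm.symm.subset (by simp)
      have hym : bf y m = false := by
        cases hym' : bf y m with
        | false => rfl
        | true =>
          have := hT1 c y m hb hym'
          rw [hmax c (List.mem_cons_self)] at this
          exact absurd this (by simp)
      refine ⟨y :: ys', m, ?_, ?_, ?_, ?_, ?_⟩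
      · simp [gbp, hb, heq]
      · exact (List.Perm.swap y c t').trans (List.Perm.cons _ hperm)
      · refine List.Pairwise.cons ?_ hpw'
        intro a ha
        rcases List.mem_cons.mp (hmem a ha) with rfl | ha'
        · exact hHS a y hb
        · exact hy a ha'
      · intro a ha
        rcases List.mem_cons.mp ha with rfl | ha'
        · by_cases hmy : bf m a = true
          · exact Or.inl hmy
          · refine Or.inr ⟨by simpa using hmy, hym, ?_⟩
            rcases List.mem_cons.mp hmmem with rfl | hm'
            · exact hHS m a hb
            · exact hy m hm'
        · exact hslt a ha'
      · intro z hz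
        rcases List.mem_cons.mp hz with rfl | hz'
        · exact hmax z (List.mem_cons_self)
        · rcases List.mem_cons.mp hz' with rfl | hz''
          · exact hym
          · exact hmax z (List.mem_cons_of_mem _ hz'')
    · -- emit c, carry y
      obtain ⟨ys', m, heq, hperm, hpw', hslt, hmax⟩ := ih y hyt
      have hmem : ∀ a, a ∈ ys' → a ∈ y :: t' := by
        intro a ha
        exact hperm.symm.subset (List.mem_append_left _ ha)
      have hmmem : m ∈ y :: t' := hperm.symm.subset (by simp)
      have hcm : bf c m = false := by
        cases hcm' : bf c m with
        | false => rfl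
        | true =>
          have := hT2 c m y hcm' (hmax y (List.mem_cons_self))
          exact absurd this hb
      refine ⟨c :: ys', m, ?_, ?_, ?_, ?_, ?_⟩
      · simp [gbp, hb, heq]
      · exact List.Perm.cons _ hperm
      · refine List.Pairwise.cons ?_ hpw'
        intro a ha
        exact hc a (hmem a ha)
      · intro a ha
        rcases List.mem_cons.mp ha with rfl | ha'
        · by_cases hmc : bf m a = true
          · exact Or.inl hmc
          · exact Or.inr ⟨by simpa using hmc, hcm, hc m hmmem⟩
        · exact hslt a ha'
      · intro z hz
        rcases List.mem_cons.mp hz with rfl | hz'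
        · exact hcm
        · exact hmax z hz'

theorem gbub_spec {α : Type} (bf : α → α → Bool) (S : α → α → Prop)
    (hA1 : ∀ a b, bf a b = true → bf b a = false)
    (hT2 : ∀ x y z, bf x y = true → bf z y = false → bf x z = true)
    (hHS : ∀ a b, bf a b = true → S b a) :
    ∀ n (l : List α), n = l.length → l.Pairwise S →
      (gbub bf n l).Perm l ∧ (gbub bf n l).Pairwise (gslt bf S) := by
  have hsplit : ∀ (A : Nat → Nat) (is : List Nat) (ys : List α) (m : α),
      (∀ i ∈ is, A i < ys.length) →
      is.foldl (fun acc i => gpass bf acc (A i)) (ys ++ [m]) =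
        is.foldl (fun acc i => gpass bf acc (A i)) ys ++ [m] := by
    intro A is
    induction is with
    | nil => intro ys m _; rfl
    | cons i is ihs =>
      intro ys m hbd
      simp only [List.foldl_cons]
      rw [gpass_append bf (A i) ys [m] (hbd i (List.mem_cons_self))]
      exact ihs _ m (fun j hj => by rw [length_gpass]; exact hbd j (List.mem_cons_of_mem _ hj))
  intro n
  induction n using Nat.strong_induction_on with
  | _ n ih =>
    intro l hn hpw
    match l with
    | [] =>
      subst hn
      exact ⟨List.Perm.refl _, List.Pairwise.nil⟩
    | c :: t =>
      have hn' : n = t.length + 1 := by simpa using hn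
      subst hn'
      unfold gbub
      rw [List.range_succ_eq_map]
      simp only [List.foldl_cons]
      have h0 : t.length + 1 - 1 - 0 = t.length := by omega
      rw [h0, gpass_full]
      obtain ⟨ys, m, heq, hperm, hpwys, hslt, _⟩ := gbp_spec bf S hA1 hT2 hHS t c hpw
      rw [heq, List.foldl_map]
      have hfun : (fun (acc : List α) i => gpass bf acc (t.length + 1 - 1 - Nat.succ i)) =
          fun acc i => gpass bf acc (t.length - 1 - i) := by
        funext acc i; congr 1; omega
      rw [hfun]
      have hyslen : ys.length = t.length := by
        have := hperm.length_eq; simp at this; omega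
      rw [hsplit (fun i => t.length - 1 - i) (List.range t.length) ys m
        (fun i hi => by simp only [hyslen]; rw [List.mem_range] at hi; omega)]
      have hrec : (List.range t.length).foldl (fun acc i => gpass bf acc (t.length - 1 - i)) ys =
          gbub bf t.length ys := rfl
      rw [hrec]
      obtain ⟨ihperm, ihpw⟩ := ih t.length (by omega) ys hyslen.symm hpwys
      constructor
      · exact (ihperm.append_right [m]).trans hperm.symm
      · rw [List.pairwise_append]
        refine ⟨ihpw, List.pairwise_singleton _ _, ?_⟩
        intro a ha b hb
        rw [List.mem_singleton] at hb
        subst hb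
        exact hslt a (ihperm.subset ha)

-- ---------- generic stability development for insertion sort (PySem.List.sorted) ----------

def Qrel {α : Type} (bef : α → α → Bool) (R : α → α → Prop) (a b : α) : Prop :=
  bef a b = true ∨ (bef a b = false ∧ bef b a = false ∧ R a b)

theorem insertBy_nil {α : Type} (bef : α → α → Bool) (x : α) :
    PySem.List.insertBy bef x [] = [x] := rfl

theorem insertBy_cons {α : Type} (bef : α → α → Bool) (x y : α) (t : List α) :
    PySem.List.insertBy bef x (y :: t) =
      if bef x y then x :: y :: t else y :: PySem.List.insertBy bef x t := rfl

theorem insertBy_pairwise {α : Type} (bef : α → α → Bool) (R : α → α → Prop)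
    (hA1 : ∀ a b, bef a b = true → bef b a = false)
    (hT2 : ∀ x y z, bef x y = true → bef z y = false → bef x z = true)
    (acc : List α) : ∀ x, acc.Pairwise (Qrel bef R) → (∀ a ∈ acc, R a x) →
      (PySem.List.insertBy bef x acc).Pairwise (Qrel bef R) := by
  induction acc with
  | nil => intro x _ _; simp [insertBy_nil]
  | cons y t ih =>
    intro x hpw hR
    have hRt : ∀ a ∈ t, R a x := fun a ha => hR a (List.mem_cons_of_mem _ ha)
    obtain ⟨hy, ht⟩ := List.pairwise_cons.mp hpw
    rw [insertBy_cons]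
    by_cases h : bef x y = true
    · simp only [h, if_true]
      refine List.Pairwise.cons ?_ (List.Pairwise.cons hy ht)
      intro z hz
      rcases List.mem_cons.mp hz with rfl | hz'
      · exact Or.inl h
      · left
        rcases hy z hz' with hyz | ⟨_, h2, _⟩
        · exact hT2 x y z h (hA1 y z hyz)
        · exact hT2 x y z h h2
    · simp only [h, if_false, Bool.false_eq_true]
      refine List.Pairwise.cons ?_ (ih x ht hRt)
      intro z hz
      rcases (PySem.List.mem_insertBy bef x z t).mp hz with rfl | hz'
      · by_cases hyx : bef y z = true
        · exact Or.inl hyx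
        · exact Or.inr ⟨by simpa using hyx, by simpa using h, hR y (List.mem_cons_self)⟩
      · exact hy z hz'

theorem foldl_insertBy_pairwise {α : Type} (bef : α → α → Bool) (R : α → α → Prop)
    (hA1 : ∀ a b, bef a b = true → bef b a = false)
    (hT2 : ∀ x y z, bef x y = true → bef z y = false → bef x z = true)
    (xs : List α) : ∀ acc, xs.Pairwise R → acc.Pairwise (Qrel bef R) →
      (∀ a ∈ acc, ∀ b ∈ xs, R a b) →
      (xs.foldl (fun acc x => PySem.List.insertBy bef x acc) acc).Pairwise (Qrel bef R) := by
  induction xs with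
  | nil => intro acc _ hacc _; exact hacc
  | cons x xs ihx =>
    intro acc hxs hacc hall
    obtain ⟨hx, hxs'⟩ := List.pairwise_cons.mp hxs
    simp only [List.foldl_cons]
    refine ihx _ hxs' ?_ ?_
    · exact insertBy_pairwise bef R hA1 hT2 acc x hacc
        (fun a ha => hall a ha x (List.mem_cons_self))
    · intro a ha b hb
      rcases (PySem.List.mem_insertBy bef x a acc).mp ha with rfl | ha'
      · exact hx b hb
      · exact hall a ha' b (List.mem_cons_of_mem _ hb)

theorem sorted_stable {α κ : Type} [LT κ] [DecidableLT κ] (key : α → κ) (R : α → α → Prop)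
    (hA1 : ∀ a b : α, decide (key a < key b) = true → decide (key b < key a) = false)
    (hT2 : ∀ x y z : α, decide (key x < key y) = true → decide (key z < key y) = false →
      decide (key x < key z) = true)
    (xs : List α) (hR : xs.Pairwise R) :
    (PySem.List.sorted xs key false).Pairwise (Qrel (fun a b => decide (key a < key b)) R) := by
  rw [PySem.List.sorted_eq_foldl_insertBy]
  exact foldl_insertBy_pairwise _ R hA1 hT2 xs [] hR List.Pairwise.nil (by simp)

theorem sorted_rev_stable {α κ : Type} [LT κ] [DecidableLT κ] (key : α → κ) (R : α → α → Prop)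
    (hA1 : ∀ a b : α, decide (key b < key a) = true → decide (key a < key b) = false)
    (hT2 : ∀ x y z : α, decide (key y < key x) = true → decide (key y < key z) = false →
      decide (key z < key x) = true)
    (xs : List α) (hR : xs.Pairwise R) :
    (PySem.List.sorted xs key true).Pairwise (Qrel (fun a b => decide (key b < key a)) R) := by
  rw [PySem.List.sorted_rev_eq_foldl_insertBy]
  exact foldl_insertBy_pairwise _ R hA1 (fun x y z h1 h2 => hT2 x y z h1 h2) xs [] hR
    List.Pairwise.nil (by simp)

-- ---------- lifting to index-tagged elements ----------

def en {α : Type} : Nat → List α → List (Nat × α)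
  | _, [] => []
  | i, x :: t => (i, x) :: en (i + 1) t

theorem en_map_snd {α : Type} (l : List α) : ∀ i, (en i l).map Prod.snd = l := by
  induction l with
  | nil => intro i; rfl
  | cons x t ih => intro i; simp [en, ih]

theorem en_length {α : Type} (l : List α) : ∀ i, (en i l).length = l.length := by
  induction l with
  | nil => intro i; rfl
  | cons x t ih => intro i; simp [en, ih]

theorem en_mem_fst {α : Type} (l : List α) : ∀ i p, p ∈ en i l → i ≤ p.1 := by
  induction l with
  | nil => intro i p h; simp [en] at h
  | cons x t ih =>
    intro i p h
    simp only [en, List.mem_cons] at h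
    rcases h with h | h
    · simp [h]
    · have := ih (i + 1) p h; omega

theorem en_pairwise {α : Type} (l : List α) : ∀ i, (en i l).Pairwise (fun a b => a.1 < b.1) := by
  induction l with
  | nil => intro i; exact List.Pairwise.nil
  | cons x t ih =>
    intro i
    refine List.Pairwise.cons (fun p hp => ?_) (ih (i + 1))
    have := en_mem_fst t (i + 1) p hp; omega

theorem mapsnd_insertBy {α β : Type} (bef : β → β → Bool) (f : α → β) (x : α) (acc : List α) :
    (PySem.List.insertBy (fun a b => bef (f a) (f b)) x acc).map f =
      PySem.List.insertBy bef (f x) (acc.map f) := by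
  induction acc with
  | nil => rfl
  | cons y t ih =>
    simp only [List.map_cons, insertBy_cons]
    by_cases h : bef (f x) (f y) <;> simp [h, ih]

theorem mapsnd_sorted {α β κ : Type} [LT κ] [DecidableLT κ] (f : α → β) (key : β → κ)
    (rev : Bool) (xs : List α) :
    (PySem.List.sorted xs (fun a => key (f a)) rev).map f =
      PySem.List.sorted (xs.map f) key rev := by
  have fold : ∀ (bef : β → β → Bool) (xs : List α) (acc : List α),
      (xs.foldl (fun acc x => PySem.List.insertBy (fun a b => bef (f a) (f b)) x acc) acc).map f =
        (xs.map f).foldl (fun acc x => PySem.List.insertBy bef x acc) (acc.map f) := by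
    intro bef xs
    induction xs with
    | nil => intro acc; rfl
    | cons x t ih => intro acc; simp only [List.foldl_cons, List.map_cons, ih, mapsnd_insertBy]
  cases rev
  · rw [PySem.List.sorted_eq_foldl_insertBy, PySem.List.sorted_eq_foldl_insertBy]
    exact fold (fun a b => decide (key a < key b)) xs []
  · rw [PySem.List.sorted_rev_eq_foldl_insertBy, PySem.List.sorted_rev_eq_foldl_insertBy]
    exact fold (fun a b => decide (key b < key a)) xs []

theorem mapsnd_gpass {α β : Type} (bf : β → β → Bool) (f : α → β) (k : Nat) :
    ∀ l : List α, (gpass (fun a b => bf (f a) (f b)) l k).map f = gpass bf (l.map f) k := by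
  induction k with
  | zero => intro l; rfl
  | succ k ih =>
    intro l
    match l with
    | [] => rfl
    | [x] => rfl
    | x :: y :: t =>
      simp only [gpass, List.map_cons]
      by_cases h : bf (f x) (f y) <;> simp only [h, if_true, if_false, Bool.false_eq_true]
      · simpa using ih (x :: t)
      · simpa using ih (y :: t)

theorem mapsnd_gbub {α β : Type} (bf : β → β → Bool) (f : α → β) (n : Nat) (l : List α) :
    (gbub (fun a b => bf (f a) (f b)) n l).map f = gbub bf n (l.map f) := by
  unfold gbub
  generalize (List.range n) = js
  induction js generalizing l with
  | nil => rfl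
  | cons j js ih => simp only [List.foldl_cons, ih, mapsnd_gpass]

-- ---------- port A as the generic bubble sort ----------

-- the inner loop body of port A, named (definitionally equal to the lambda in the port)
def pstep (sl : List (List (String × Int))) (j : Nat) : List (List (String × Int)) :=
  let dj  := (PySem.List.pyGet? sl (Int.ofNat j)).getD []
  let dj1 := (PySem.List.pyGet? sl (Int.ofNat j + 1)).getD []
  if pvVal0 dj < pvVal0 dj1 then
    (sl.set j dj1).set (j + 1) dj
  else if pvVal0 dj = pvVal0 dj1 then
    if PySem.Str.len (pvKey0 dj) > PySem.Str.len (pvKey0 dj1) then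
      (sl.set j dj1).set (j + 1) dj
    else if PySem.Str.len (pvKey0 dj) = PySem.Str.len (pvKey0 dj1) then
      if pvKey0 dj < pvKey0 dj1 then
        (sl.set j dj1).set (j + 1) dj
      else sl
    else sl
  else sl

theorem length_gswap {α : Type} (bf : α → α → Bool) (l : List α) (j : Nat) :
    (gswap bf l j).length = l.length := by
  unfold gswap
  cases hx : l[j]? <;> cases hy : l[j+1]? <;> simp
  split <;> simp

theorem nested_if_eq (x y : List (String × Int)) (A B : List (List (String × Int))) :
    (if pvVal0 x < pvVal0 y then A
     else if pvVal0 x = pvVal0 y then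
       if PySem.Str.len (pvKey0 x) > PySem.Str.len (pvKey0 y) then A
       else if PySem.Str.len (pvKey0 x) = PySem.Str.len (pvKey0 y) then
         if pvKey0 x < pvKey0 y then A else B
       else B
     else B) = if aft x y then A else B := by
  cases hb : aft x y with
  | true =>
    rw [aft_iff] at hb
    simp only [if_true]
    split_ifs <;> first
      | rfl
      | (exfalso; rcases hb with h | ⟨hv, h | ⟨hl, hk⟩⟩ <;> simp_all <;> omega)
  | false =>
    simp only [Bool.false_eq_true, if_false]
    split_ifs <;> first
      | rfl
      | (exfalso; exact absurd ((aft_iff x y).mpr (by tauto)) (by simp [hb]))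

theorem pstep_eq_gswap (sl : List (List (String × Int))) (j : Nat) (h : j + 1 < sl.length) :
    pstep sl j = gswap aft sl j := by
  have hj : j < sl.length := by omega
  have e1 : PySem.List.pyGet? sl (Int.ofNat j) = some sl[j] := by
    rw [show (Int.ofNat j) = ((j : Nat) : Int) from rfl, PySem.List.pyGet?_natCast,
      List.getElem?_eq_getElem hj]
  have e2 : PySem.List.pyGet? sl (Int.ofNat j + 1) = some sl[j + 1] := by
    rw [show (Int.ofNat j + 1) = ((j + 1 : Nat) : Int) from by
        rw [show Int.ofNat j = ((j : Nat) : Int) from rfl]; push_cast; ring,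
      PySem.List.pyGet?_natCast, List.getElem?_eq_getElem h]
  simp only [pstep, gswap, e1, e2, List.getElem?_eq_getElem hj, List.getElem?_eq_getElem h,
    Option.getD_some]
  exact nested_if_eq sl[j] sl[j + 1] _ _

theorem inner_fold_eq : ∀ (js : List Nat) (sl : List (List (String × Int))),
    (∀ j ∈ js, j + 1 < sl.length) → js.foldl pstep sl = js.foldl (gswap aft) sl := by
  intro js
  induction js with
  | nil => intro sl _; rfl
  | cons j js ih =>
    intro sl hb
    simp only [List.foldl_cons]
    rw [pstep_eq_gswap sl j (hb j (List.mem_cons_self))]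
    exact ih _ (fun j' hj' => by rw [length_gswap]; exact hb j' (List.mem_cons_of_mem _ hj'))

theorem portA_eq_gbub (lst : List (List (String × Int))) :
    sort_dictionaries lst = gbub aft lst.length lst := by
  show (List.range lst.length).foldl
      (fun sl i => (List.range (lst.length - 1 - i)).foldl pstep sl) lst =
    gbub aft lst.length lst
  unfold gbub
  have main : ∀ (is : List Nat) (acc : List (List (String × Int))), acc.length = lst.length →
      is.foldl (fun sl i => (List.range (lst.length - 1 - i)).foldl pstep sl) acc =
        is.foldl (fun acc i => gpass aft acc (lst.length - 1 - i)) acc := by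
    intro is
    induction is with
    | nil => intro acc _; rfl
    | cons i is ih =>
      intro acc hlen
      simp only [List.foldl_cons]
      rw [inner_fold_eq (List.range (lst.length - 1 - i)) acc
          (fun j hj => by rw [hlen]; rw [List.mem_range] at hj; omega),
        foldl_range_gswap]
      exact ih _ (by rw [length_gpass, hlen])
  exact main _ lst rfl

-- ---------- the concrete index-tagged relations ----------

def aft' (a b : Nat × List (String × Int)) : Bool := aft a.2 b.2

def Srel (a b : Nat × List (String × Int)) : Prop :=
  aft a.2 b.2 = false → aft b.2 a.2 = false → a.1 < b.1

theorem R3_implies_gslt (a b : Nat × List (String × Int))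
    (h : Qrel (fun p q => decide (pvVal0 q.2 < pvVal0 p.2))
          (Qrel (fun p q => decide (PySem.Str.len (pvKey0 p.2) < PySem.Str.len (pvKey0 q.2)))
            (Qrel (fun p q => decide (pvKey0 q.2 < pvKey0 p.2))
              (fun p q => p.1 < q.1)) ) a b) :
    gslt aft' Srel a b := by
  unfold Qrel at h
  simp only [decide_eq_true_eq, decide_eq_false_iff_not] at h
  unfold gslt aft' Srel
  rcases h with h | ⟨h1, h2, h⟩
  · left; rw [aft_iff]; exact Or.inl h
  · have hv : pvVal0 a.2 = pvVal0 b.2 := by omega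
    rcases h with h | ⟨h3, h4, h⟩
    · left; rw [aft_iff]; exact Or.inr ⟨hv.symm, Or.inl h⟩
    · have hl : PySem.Str.len (pvKey0 a.2) = PySem.Str.len (pvKey0 b.2) := by omega
      rcases h with h | ⟨h5, h6, hidx⟩
      · left; rw [aft_iff]; exact Or.inr ⟨hv.symm, Or.inr ⟨hl.symm, h⟩⟩
      · have hk : pvKey0 a.2 = pvKey0 b.2 := le_antisymm (not_lt.mp h5) (not_lt.mp h6)
        exact Or.inr ⟨aft_false_of_tie b.2 a.2 hv.symm hl.symm hk.symm,
          aft_false_of_tie a.2 b.2 hv hl hk, fun _ _ => hidx⟩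

theorem gslt_antisymm (a b : Nat × List (String × Int))
    (h1 : gslt aft' Srel a b) (h2 : gslt aft' Srel b a) : a = b := by
  unfold gslt aft' Srel at h1 h2
  rcases h1 with h1 | ⟨h1a, h1b, h1c⟩ <;> rcases h2 with h2 | ⟨h2a, h2b, h2c⟩
  · exact absurd h2 (by rw [aft_A1 _ _ h1]; simp)
  · exact absurd h1 (by rw [h2b]; simp)
  · exact absurd h2 (by rw [h1b]; simp)
  · have ha := h1c h1b h1a
    exact absurd (h2c h2b h2a) (by omega)

-- ===== VERDICT helper: the main equality =====

theorem main_eq (lst : List (List (String × Int))) :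
    sort_dictionaries lst = sort_dictionaries_alt lst := by
  -- the bubble-sort side, lifted to index-tagged elements
  have hA1' : ∀ a b : Nat × List (String × Int), aft' a b = true → aft' b a = false :=
    fun a b h => aft_A1 _ _ h
  have hT2' : ∀ x y z : Nat × List (String × Int),
      aft' x y = true → aft' z y = false → aft' x z = true :=
    fun x y z h1 h2 => aft_T2 _ _ _ h1 h2
  have hHS' : ∀ a b : Nat × List (String × Int), aft' a b = true → Srel b a :=
    fun a b h => fun _ h2 => absurd (show aft a.2 b.2 = true from h) (by simp [h2])
  have hSpw : (en 0 lst).Pairwise Srel :=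
    (en_pairwise lst 0).imp (fun h => fun _ _ => h)
  obtain ⟨hApm, hApw⟩ := gbub_spec aft' Srel hA1' hT2' hHS' lst.length (en 0 lst)
    (by rw [en_length]) hSpw
  have hA : sort_dictionaries lst = (gbub aft' lst.length (en 0 lst)).map Prod.snd := by
    rw [portA_eq_gbub]
    have h := mapsnd_gbub (bf := aft) (f := Prod.snd) (n := lst.length) (l := en 0 lst)
    rw [en_map_snd] at h
    exact h.symm
  -- the three stable sort passes, lifted to index-tagged elements
  have key1A1 : ∀ a b : Nat × List (String × Int),
      decide (pvKey0 b.2 < pvKey0 a.2) = true → decide (pvKey0 a.2 < pvKey0 b.2) = false := by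
    intro a b h
    simp only [decide_eq_true_eq] at h
    simpa using asymm h
  have key1T2 : ∀ x y z : Nat × List (String × Int),
      decide (pvKey0 y.2 < pvKey0 x.2) = true → decide (pvKey0 y.2 < pvKey0 z.2) = false →
        decide (pvKey0 z.2 < pvKey0 x.2) = true := by
    intro x y z h1 h2
    simp only [decide_eq_true_eq] at h1 ⊢
    simp only [decide_eq_false_iff_not] at h2
    exact lt_of_le_of_lt (not_lt.mp h2) h1
  have key2A1 : ∀ a b : Nat × List (String × Int),
      decide (PySem.Str.len (pvKey0 a.2) < PySem.Str.len (pvKey0 b.2)) = true →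
        decide (PySem.Str.len (pvKey0 b.2) < PySem.Str.len (pvKey0 a.2)) = false := by
    intro a b h
    simp only [decide_eq_true_eq] at h
    simp only [decide_eq_false_iff_not]
    omega
  have key2T2 : ∀ x y z : Nat × List (String × Int),
      decide (PySem.Str.len (pvKey0 x.2) < PySem.Str.len (pvKey0 y.2)) = true →
        decide (PySem.Str.len (pvKey0 z.2) < PySem.Str.len (pvKey0 y.2)) = false →
        decide (PySem.Str.len (pvKey0 x.2) < PySem.Str.len (pvKey0 z.2)) = true := by
    intro x y z h1 h2
    simp only [decide_eq_true_eq] at h1 ⊢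
    simp only [decide_eq_false_iff_not] at h2
    omega
  have key3A1 : ∀ a b : Nat × List (String × Int),
      decide (pvVal0 b.2 < pvVal0 a.2) = true → decide (pvVal0 a.2 < pvVal0 b.2) = false := by
    intro a b h
    simp only [decide_eq_true_eq] at h
    simp only [decide_eq_false_iff_not]
    omega
  have key3T2 : ∀ x y z : Nat × List (String × Int),
      decide (pvVal0 y.2 < pvVal0 x.2) = true → decide (pvVal0 y.2 < pvVal0 z.2) = false →
        decide (pvVal0 z.2 < pvVal0 x.2) = true := by
    intro x y z h1 h2
    simp only [decide_eq_true_eq] at h1 ⊢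
    simp only [decide_eq_false_iff_not] at h2
    omega
  have h1pw := sorted_rev_stable (key := fun p : Nat × List (String × Int) => pvKey0 p.2)
    (fun a b => a.1 < b.1) key1A1 key1T2 (en 0 lst) (en_pairwise lst 0)
  have h2pw := sorted_stable (key := fun p : Nat × List (String × Int) => PySem.Str.len (pvKey0 p.2))
    _ key2A1 key2T2 _ h1pw
  have h3pw := sorted_rev_stable (key := fun p : Nat × List (String × Int) => pvVal0 p.2)
    _ key3A1 key3T2 _ h2pw
  have hP3pw := h3pw.imp (fun {a b} h => R3_implies_gslt a b h)
  have hperm3 : (PySem.List.sorted (PySem.List.sorted (PySem.List.sorted (en 0 lst)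
      (fun p : Nat × List (String × Int) => pvKey0 p.2) true)
      (fun p => PySem.Str.len (pvKey0 p.2)) false)
      (fun p => pvVal0 p.2) true).Perm (en 0 lst) :=
    (PySem.List.sorted_perm _ _ _).trans
      ((PySem.List.sorted_perm _ _ _).trans (PySem.List.sorted_perm _ _ _))
  have hEq := List.Perm.eq_of_pairwise
    (fun a b _ _ ha hb => gslt_antisymm a b ha hb) hApw hP3pw (hApm.trans hperm3.symm)
  -- push the map through the three passes
  have b1 := mapsnd_sorted (Prod.snd) (fun d : List (String × Int) => pvKey0 d) true (en 0 lst)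
  rw [en_map_snd] at b1
  have b2 := mapsnd_sorted (Prod.snd) (fun d : List (String × Int) => PySem.Str.len (pvKey0 d))
    false (PySem.List.sorted (en 0 lst) (fun p => pvKey0 p.2) true)
  rw [b1] at b2
  have b3 := mapsnd_sorted (Prod.snd) (fun d : List (String × Int) => pvVal0 d) true
    (PySem.List.sorted (PySem.List.sorted (en 0 lst) (fun p => pvKey0 p.2) true)
      (fun p => PySem.Str.len (pvKey0 p.2)) false)
  rw [b2] at b3
  rw [hA, hEq, b3]
  rfl

-- ===== VERDICT (by name: the statement is the Claim_ definition above) =====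
theorem sort_dictionaries_spec : Claim_equal_sort_dictionaries := by
  intro lst _ _
  unfold Spec_sort_dictionaries
  exact main_eq lst
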